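-- pv_equiv track=rewrite | github.com/nickpanagios/AgentOS | engine/orchestrator.py | _extract_flag
-- ===== SOURCE A (Python) =====
-- def _extract_flag(args, flag, default=None):
--     """Extract --flag value from args list."""
--     remaining = []
--     value = default
--     i = 0
--     while i < len(args):
--         if args[i] == flag and i + 1 < len(args):
--             value = args[i + 1]
--             i += 2
--         else:
--             remaining.append(args[i])
--             i += 1
--     return value, remaining
-- ===== SOURCE B (Python) =====
-- def _extract_flag(args, flag, default=None):
--     """Extract --flag value from args list."""
--     remaining = []
--     value = default
--     i = 0
--     n = len(args)
--     while True:
--         try: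
--             j = args.index(flag, i)
--         except ValueError:
--             remaining.extend(args[i:])
--             return value, remaining
--         remaining.extend(args[i:j])
--         if j + 1 < n:
--             value = args[j + 1]
--             i = j + 2
--         else:
--             remaining.append(flag)
--             return value, remaining
-- ===== Notes on version B (the rewrite author's own statement) =====
-- stated objective: alternative
-- what changed: Replaces A's per-element state-machine loop (index i, branch on every element) by a segment algorithm: repeatedly locate the next flag occurrence with list.index(flag, i) and bulk-copy the whole flag-free segment into remaining with slice extend, then grab the following element as the value.
import Mathlib
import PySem

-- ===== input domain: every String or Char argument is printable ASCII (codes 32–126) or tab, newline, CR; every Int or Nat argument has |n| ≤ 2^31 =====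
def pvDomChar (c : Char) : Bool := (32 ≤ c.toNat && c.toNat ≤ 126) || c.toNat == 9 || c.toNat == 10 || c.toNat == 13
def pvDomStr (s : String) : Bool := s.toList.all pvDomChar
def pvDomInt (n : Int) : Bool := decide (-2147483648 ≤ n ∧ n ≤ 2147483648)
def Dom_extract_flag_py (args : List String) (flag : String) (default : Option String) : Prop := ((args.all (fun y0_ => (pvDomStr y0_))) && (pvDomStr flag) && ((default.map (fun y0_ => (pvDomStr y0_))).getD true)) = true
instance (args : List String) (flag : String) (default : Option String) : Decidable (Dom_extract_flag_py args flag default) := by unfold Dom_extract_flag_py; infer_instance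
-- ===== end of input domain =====

-- B replaces A's per-element index loop by a segment algorithm (find next flag with list.index, bulk-extend the flag-free segment); an alternative decomposition, same cost.


-- ===== PORT A =====
-- A: while loop over an index; each step either consumes two elements (flag + value)
-- or appends one element to `remaining`. Ported as structural recursion on the
-- suffix of args, carrying `value` and `remaining` as loop state.
def pvALoop (flag : String) : List String → Option String → List String → Option String × List String
  | [], value, remaining => (value, remaining)
  | a :: rest, value, remaining =>
    if a == flag ∧ rest ≠ [] then          -- args[i] == flag and i + 1 < len(args)
      pvALoop flag rest.tail (some (rest.headD "")) remaining   -- value = args[i+1]; i += 2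
    else
      pvALoop flag rest value (remaining ++ [a])                -- remaining.append(args[i]); i += 1
  termination_by l _ _ => l.length
  decreasing_by all_goals (simp [List.length_tail]; try omega)

def extract_flag_py (args : List String) (flag : String) (default : Option String) : Option String × List String :=
  pvALoop flag args default []

-- ===== PORT B =====
-- B: repeat { j = args.index(flag, i); remaining.extend(args[i:j]); value = args[j+1]; i = j+2 }.
-- On the unprocessed suffix, args.index(flag, i) + the slice args[i:j] is exactly the
-- takeWhile/dropWhile split at the first flag occurrence; ported as recursion on that suffix.
def pvBGo (flag : String) : List String → Option String → Option String × List String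
  | l, value =>
    match h : l.dropWhile (fun a => a != flag) with
    | [] => (value, l.takeWhile (fun a => a != flag))            -- ValueError: extend args[i:], return
    | [_] => (value, l.takeWhile (fun a => a != flag) ++ [flag]) -- flag is last: append flag, return
    | _ :: b :: rest =>                                          -- value = args[j+1]; i = j+2
        let r := pvBGo flag rest (some b)
        (r.1, l.takeWhile (fun a => a != flag) ++ r.2)
  termination_by l _ => l.length
  decreasing_by
    have := List.length_dropWhile_le (p := fun a => a != flag) (l := l)
    simp [h] at this
    omega

def extract_flag_py_alt (args : List String) (flag : String) (default : Option String) : Option String × List String :=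
  pvBGo flag args default

-- ===== PRECONDITION & SPEC =====
def Spec_extract_flag_py (args : List String) (flag : String) (default : Option String) (out : Option String × List String) : Prop := out = extract_flag_py_alt args flag default
instance (args : List String) (flag : String) (default : Option String) (out : Option String × List String) : Decidable (Spec_extract_flag_py args flag default out) := by unfold Spec_extract_flag_py; infer_instance

-- ===== CLAIM (what is proved, stated in full; the proofs are below) =====
def Claim_equal_extract_flag_py : Prop := ∀ (args : List String) (flag : String) (default : Option String), Dom_extract_flag_py args flag default → Spec_extract_flag_py args flag default (extract_flag_py args flag default)

-- ===== LEMMAS AND PROOFS =====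

-- one-step unfoldings of pvBGo, matching pvALoop's three cases
lemma pvBGo_nil (flag : String) (v : Option String) : pvBGo flag [] v = (v, []) := by
  simp [pvBGo]

lemma pvBGo_cons_ne (flag a : String) (rest : List String) (v : Option String)
    (hf : (a == flag) = false) :
    pvBGo flag (a :: rest) v = ((pvBGo flag rest v).1, a :: (pvBGo flag rest v).2) := by
  have hne : (a != flag) = true := by simp [bne, hf]
  have key : List.dropWhile (fun x => x != flag) (a :: rest)
      = List.dropWhile (fun x => x != flag) rest := by simp [hne]
  have tk : List.takeWhile (fun x => x != flag) (a :: rest)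
      = a :: List.takeWhile (fun x => x != flag) rest := by simp [hne]
  rw [pvBGo]
  conv_rhs => rw [pvBGo]
  split <;> rename_i heq <;> rw [key] at heq <;> rw [heq, tk] <;> simp

lemma pvBGo_flag_nil (flag a : String) (v : Option String) (hf : (a == flag) = true) :
    pvBGo flag [a] v = (v, [flag]) := by
  have hne : (a != flag) = false := by simp [bne, hf]
  have key : List.dropWhile (fun x => x != flag) [a] = [a] := by
    simp [hne]
  rw [pvBGo]
  split <;> rename_i heq <;> rw [key] at heq <;> simp_all

lemma pvBGo_flag_cons (flag a b : String) (rest : List String) (v : Option String)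
    (hf : (a == flag) = true) :
    pvBGo flag (a :: b :: rest) v = pvBGo flag rest (some b) := by
  have hne : (a != flag) = false := by simp [bne, hf]
  have key : List.dropWhile (fun x => x != flag) (a :: b :: rest) = a :: b :: rest := by
    simp [hne]
  rw [pvBGo]
  split <;> rename_i heq <;> rw [key] at heq <;> simp_all

lemma pvLoop_agree (flag : String) (l : List String) (v : Option String) (rem : List String) :
    pvALoop flag l v rem = ((pvBGo flag l v).1, rem ++ (pvBGo flag l v).2) := by
  fun_induction pvALoop flag l v rem with
  | case1 v rem => simp [pvBGo_nil]
  | case2 a rest v rem h ih =>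
      obtain ⟨hf, hr⟩ := h
      cases rest with
      | nil => simp at hr
      | cons b rest' =>
          rw [pvBGo_flag_cons flag a b rest' v hf]
          simpa using ih
  | case3 a rest v rem h ih =>
      by_cases hf : (a == flag) = true
      · cases rest with
        | nil =>
            have ha : a = flag := eq_of_beq hf
            rw [pvBGo_flag_nil flag a v hf]
            simp [pvALoop, ha]
        | cons b rest' => exact absurd ⟨hf, by simp⟩ h
      · have hf' : (a == flag) = false := by simpa using hf
        rw [pvBGo_cons_ne flag a rest v hf']
        simp [ih]

-- ===== VERDICT (by name: the statement is the Claim_ definition above) =====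
theorem extract_flag_py_spec : Claim_equal_extract_flag_py := by
  intro args flag default _
  unfold Spec_extract_flag_py extract_flag_py extract_flag_py_alt
  simpa using pvLoop_agree flag args default []
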